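-- pv_equiv track=rewrite | github.com/hutcber/CARF | generate_reflections.py | del_think
-- ===== SOURCE A (Python) =====
-- def del_think(scenario):
--     line = scenario.split("\n")
--     flag = False
--     newScenario = ""
--     for i, it in enumerate(line):
--         if it.startswith("> think:") or it.startswith("OK"):
--             if flag:
--                 continue
--             else:
--                 newScenario += it
--                 newScenario += '\n'
--                 flag = True
--         else:
--             newScenario += it
--             newScenario += '\n'
--     return newScenario
-- ===== SOURCE B (Python) =====
-- def del_think(scenario):
--     lines = scenario.split("\n")
--     def special(l):
--         return l.startswith("> think:") or l.startswith("OK")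
--     first = next((i for i, l in enumerate(lines) if special(l)), None)
--     if first is None:
--         kept = lines
--     else:
--         kept = lines[:first + 1] + [l for l in lines[first + 1:] if not special(l)]
--     return "\n".join(kept) + "\n"
-- ===== Notes on version B (the rewrite author's own statement) =====
-- stated objective: simpler
-- what changed: A threads a mutable never-reset flag through one append loop; B instead finds the index of the first special (think/OK) line, keeps the prefix up to it via a slice, filters later special lines out of the tail, and joins the kept lines with newlines.
import Mathlib
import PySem

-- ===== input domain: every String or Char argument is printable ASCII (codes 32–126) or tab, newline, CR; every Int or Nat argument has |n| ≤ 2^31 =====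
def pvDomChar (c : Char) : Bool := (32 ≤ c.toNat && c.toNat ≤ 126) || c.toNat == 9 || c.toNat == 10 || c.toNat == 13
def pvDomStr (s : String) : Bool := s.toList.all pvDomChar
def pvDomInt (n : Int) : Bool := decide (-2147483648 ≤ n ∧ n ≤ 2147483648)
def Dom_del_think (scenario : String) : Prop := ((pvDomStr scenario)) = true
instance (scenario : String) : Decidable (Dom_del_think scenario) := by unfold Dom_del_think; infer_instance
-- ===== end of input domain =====

-- B replaces A's mutable never-reset flag loop by find-first-special-index, slice, and a filter of the tail (objective: simpler decomposition, same cost).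

-- ===== PORT A =====
-- one loop iteration of A: append the line (plus '\n') unless it is a special line seen after the first one
def pvStepA (st : Bool × List Char) (it : List Char) : Bool × List Char :=
  if PySem.Chars.startswith it "> think:".toList || PySem.Chars.startswith it "OK".toList then
    if st.1 then st
    else (true, st.2 ++ (it ++ ['\n']))
  else (st.1, st.2 ++ (it ++ ['\n']))

def del_think (scenario : String) : String :=
  let line := PySem.Chars.splitOn scenario.toList "\n".toList
  String.ofList (line.foldl pvStepA (false, [])).2

-- ===== PORT B =====
-- B's nested 'special' predicate
def pvSpecial (l : List Char) : Bool :=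
  PySem.Chars.startswith l "> think:".toList || PySem.Chars.startswith l "OK".toList

def del_think_alt (scenario : String) : String :=
  let lines := PySem.Chars.splitOn scenario.toList "\n".toList
  let kept :=
    match lines.findIdx? pvSpecial with
    | none => lines
    | some first =>
        lines.take (first + 1) ++ (lines.drop (first + 1)).filter (fun l => !pvSpecial l)
  String.ofList (PySem.Chars.join "\n".toList kept ++ ['\n'])

-- ===== PRECONDITION & SPEC =====
def Spec_del_think (scenario : String) (out : String) : Prop := out = del_think_alt scenario
instance (scenario : String) (out : String) : Decidable (Spec_del_think scenario out) := by unfold Spec_del_think; infer_instance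

-- ===== CLAIM (what is proved, stated in full; the proofs are below) =====
def Claim_equal_del_think : Prop := ∀ (scenario : String), Dom_del_think scenario → Spec_del_think scenario (del_think scenario)

-- ===== LEMMAS AND PROOFS =====

-- each kept line followed by a newline, concatenated
def pvStrOf (ks : List (List Char)) : List Char := ks.flatMap (fun k => k ++ ['\n'])

-- the list of lines B keeps
def pvKept (ls : List (List Char)) : List (List Char) :=
  match ls.findIdx? pvSpecial with
  | none => ls
  | some first => ls.take (first + 1) ++ (ls.drop (first + 1)).filter (fun l => !pvSpecial l)

theorem pv_stepA_eq (st : Bool × List Char) (it : List Char) :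
    pvStepA st it =
      if pvSpecial it then (if st.1 then st else (true, st.2 ++ (it ++ ['\n'])))
      else (st.1, st.2 ++ (it ++ ['\n'])) := rfl

theorem pvStrOf_cons (k : List Char) (ks : List (List Char)) :
    pvStrOf (k :: ks) = (k ++ ['\n']) ++ pvStrOf ks := by simp [pvStrOf]

theorem pv_foldl_true (ls : List (List Char)) (acc : List Char) :
    List.foldl pvStepA (true, acc) ls
      = (true, acc ++ pvStrOf (ls.filter (fun l => !pvSpecial l))) := by
  induction ls generalizing acc with
  | nil => simp [pvStrOf]
  | cons l ls ih =>
      rw [List.foldl_cons, pv_stepA_eq]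
      cases h : pvSpecial l with
      | true => simp [h, ih]
      | false => simp [h, ih, pvStrOf_cons, List.filter_cons]

theorem pv_foldl_false (ls : List (List Char)) (acc : List Char) :
    (List.foldl pvStepA (false, acc) ls).2 = acc ++ pvStrOf (pvKept ls) := by
  induction ls generalizing acc with
  | nil => simp [pvKept, pvStrOf]
  | cons l ls ih =>
      rw [List.foldl_cons, pv_stepA_eq]
      cases h : pvSpecial l with
      | true =>
          have hk : pvKept (l :: ls) = l :: ls.filter (fun x => !pvSpecial x) := by
            unfold pvKept
            rw [List.findIdx?_cons, if_pos h]
            simp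
          rw [hk]
          simp [pv_foldl_true, pvStrOf_cons]
      | false =>
          have hk : pvKept (l :: ls) = l :: pvKept ls := by
            unfold pvKept
            rw [List.findIdx?_cons, if_neg (by simp [h])]
            cases hfi : ls.findIdx? pvSpecial with
            | none => simp
            | some j => simp
          rw [hk]
          simp [ih, pvStrOf_cons]

theorem pv_splitOn_go_ne_nil (sep : List Char) (fuel : Nat) (l cur : List Char)
    (acc : List (List Char)) : PySem.Chars.splitOn.go sep fuel l cur acc ≠ [] := by
  induction fuel generalizing l cur acc with
  | zero => simp [PySem.Chars.splitOn.go]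
  | succ n ih =>
      cases l with
      | nil => simp [PySem.Chars.splitOn.go]
      | cons c rest =>
          rw [PySem.Chars.splitOn.go]
          split
          · exact ih _ _ _
          · exact ih _ _ _

theorem pv_splitOn_ne_nil (s sep : List Char) : PySem.Chars.splitOn s sep ≠ [] := by
  unfold PySem.Chars.splitOn
  exact pv_splitOn_go_ne_nil _ _ _ _ _

theorem pv_kept_ne_nil (ls : List (List Char)) (h : ls ≠ []) : pvKept ls ≠ [] := by
  unfold pvKept
  cases hfi : ls.findIdx? pvSpecial with
  | none => simpa
  | some j =>
      cases ls with
      | nil => simp at h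
      | cons a as => simp

theorem pv_join_newline (ks : List (List Char)) (h : ks ≠ []) :
    PySem.Chars.join "\n".toList ks ++ ['\n'] = pvStrOf ks := by
  induction ks with
  | nil => simp at h
  | cons k ks ih =>
      cases ks with
      | nil => simp [PySem.Chars.join_singleton, pvStrOf]
      | cons k2 rest =>
          rw [PySem.Chars.join_cons_cons, pvStrOf_cons, ← ih (by simp)]
          simp

-- ===== VERDICT (by name: the statement is the Claim_ definition above) =====
theorem del_think_spec : Claim_equal_del_think := by
  intro scenario _
  unfold Spec_del_think del_think del_think_alt
  have hkept :
      (match (PySem.Chars.splitOn scenario.toList "\n".toList).findIdx? pvSpecial with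
        | none => PySem.Chars.splitOn scenario.toList "\n".toList
        | some first =>
            (PySem.Chars.splitOn scenario.toList "\n".toList).take (first + 1) ++
              ((PySem.Chars.splitOn scenario.toList "\n".toList).drop (first + 1)).filter
                (fun l => !pvSpecial l))
        = pvKept (PySem.Chars.splitOn scenario.toList "\n".toList) := rfl
  simp only [hkept]
  rw [pv_foldl_false, pv_join_newline _
    (pv_kept_ne_nil _ (pv_splitOn_ne_nil _ _))]
  simp
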